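-- pv_equiv track=rewrite | github.com/392781/Algorithm-Analysis | src/MatrixMultiplier.py | generate
-- ===== SOURCE A (Python) =====
-- def generate(n):
--     m1 = [[0] * n for x in range(n)]
--     m2 = [[0] * n for x in range(n)]
--
--     for i in range(n):
--         for j in range(n):
--             m1[i][j] = (j % 32)
--             m2[i][j] = (j % 64)
--
--     return m1,m2
-- ===== SOURCE B (Python) =====
-- def generate(n):
--     # Column-major construction: each column j is constant, then transpose via zip.
--     cols1 = [[j % 32] * n for j in range(n)]
--     cols2 = [[j % 64] * n for j in range(n)]
--     m1 = [list(t) for t in zip(*cols1)]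
--     m2 = [list(t) for t in zip(*cols2)]
--     return m1, m2
-- ===== Notes on version B (the rewrite author's own statement) =====
-- stated objective: alternative
-- what changed: Builds the matrices column-major (each column is a constant list) and then transposes with zip, instead of A's row-major nested per-cell assignment into preallocated zero matrices.
import Mathlib
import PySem

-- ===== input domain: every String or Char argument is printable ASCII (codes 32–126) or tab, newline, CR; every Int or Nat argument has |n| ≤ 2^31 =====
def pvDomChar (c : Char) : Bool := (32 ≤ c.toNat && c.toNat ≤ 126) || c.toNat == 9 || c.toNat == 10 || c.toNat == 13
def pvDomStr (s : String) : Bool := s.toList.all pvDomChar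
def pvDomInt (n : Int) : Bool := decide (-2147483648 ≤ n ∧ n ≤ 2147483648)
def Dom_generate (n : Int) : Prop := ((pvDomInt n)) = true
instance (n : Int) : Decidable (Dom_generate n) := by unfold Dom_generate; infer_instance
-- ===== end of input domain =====

-- B builds the matrices column-major (each column a constant list) and transposes with zip,
-- instead of A's row-major per-cell assignment into preallocated zero matrices (objective: alternative).

-- ===== PORT A =====
-- m[i][j] = v; in A both i and j always come from range(n), so they are nonnegative and in range
def pvSetCell (m : List (List Int)) (i j : Int) (v : Int) : List (List Int) :=
  m.set i.toNat ((m.getD i.toNat []).set j.toNat v)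

def generate (n : Int) : List (List Int) × List (List Int) :=
  -- [[0] * n for x in range(n)] ; [0]*n is empty for n ≤ 0, exactly replicate n.toNat
  let m1 := (PySem.List.pyRange 0 n 1).map (fun _ => List.replicate n.toNat (0 : Int))
  let m2 := (PySem.List.pyRange 0 n 1).map (fun _ => List.replicate n.toNat (0 : Int))
  (PySem.List.pyRange 0 n 1).foldl
    (fun p i =>
      (PySem.List.pyRange 0 n 1).foldl
        (fun q j =>
          (pvSetCell q.1 i j (PySem.Int.mod j 32), pvSetCell q.2 i j (PySem.Int.mod j 64)))
        p)
    (m1, m2)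

-- ===== PORT B =====
-- zip(*cols): rows of heads while every column is nonempty and there is at least one column
def pvZipStar (cols : List (List Int)) : List (List Int) :=
  if h : cols ≠ [] ∧ cols.all (fun c => !c.isEmpty) then
    (cols.map (fun c => c.headD 0)) :: pvZipStar (cols.map List.tail)
  else []
termination_by (cols.headD []).length
decreasing_by
  obtain ⟨hne, hall⟩ := h
  cases cols with
  | nil => exact absurd rfl hne
  | cons c rest =>
    have hc : ¬ c.isEmpty := by
      have := List.all_eq_true.mp hall c (List.mem_cons_self)
      simpa using this
    cases c with
    | nil => simp at hc
    | cons a as => simp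

def generate_alt (n : Int) : List (List Int) × List (List Int) :=
  -- cols1 = [[j % 32] * n for j in range(n)], cols2 likewise with 64; then zip-transpose
  let cols1 := (PySem.List.pyRange 0 n 1).map (fun j => List.replicate n.toNat (PySem.Int.mod j 32))
  let cols2 := (PySem.List.pyRange 0 n 1).map (fun j => List.replicate n.toNat (PySem.Int.mod j 64))
  (pvZipStar cols1, pvZipStar cols2)

-- ===== PRECONDITION & SPEC =====
def Spec_generate (n : Int) (out : List (List Int) × List (List Int)) : Prop := out = generate_alt n
instance (n : Int) (out : List (List Int) × List (List Int)) : Decidable (Spec_generate n out) := by unfold Spec_generate; infer_instance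

-- ===== CLAIM (what is proved, stated in full; the proofs are below) =====
def Claim_equal_generate : Prop := ∀ (n : Int), Dom_generate n → Spec_generate n (generate n)

-- ===== LEMMAS AND PROOFS =====

-- Nat-indexed version of pvSetCell (i, j in A always come from range(n))
def pvSetCellN (m : List (List Int)) (i j : Nat) (v : Int) : List (List Int) :=
  m.set i ((m.getD i []).set j v)

lemma pvSetCell_natCast (m : List (List Int)) (i j : Nat) (v : Int) :
    pvSetCell m (i : Int) (j : Int) v = pvSetCellN m i j v := by
  simp [pvSetCell, pvSetCellN]

lemma foldl_pair {α M₁ M₂ : Type} (F : M₁ → α → M₁) (G : M₂ → α → M₂) :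
    ∀ (js : List α) (a : M₁) (b : M₂),
      js.foldl (fun q j => (F q.1 j, G q.2 j)) (a, b) = (js.foldl F a, js.foldl G b) := by
  intro js
  induction js with
  | nil => intro a b; rfl
  | cons j js ih => intro a b; simp only [List.foldl_cons]; exact ih (F a j) (G b j)

lemma foldl_set_shift (f : Nat → Int) :
    ∀ (js : List Nat) (x : Int) (xs : List Int),
      js.foldl (fun r j => r.set (j + 1) (f (j + 1))) (x :: xs)
        = x :: js.foldl (fun r j => r.set j (f (j + 1))) xs := by
  intro js
  induction js with
  | nil => intro x xs; rfl
  | cons j js ih => intro x xs; simp only [List.foldl_cons, List.set_cons_succ]; exact ih x _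

lemma row_fold : ∀ (l : List Int) (f : Nat → Int),
    (List.range l.length).foldl (fun r j => r.set j (f j)) l = (List.range l.length).map f := by
  intro l
  induction l with
  | nil => intro f; rfl
  | cons a l ih =>
    intro f
    rw [List.length_cons, List.range_succ_eq_map]
    simp only [List.foldl_cons, List.foldl_map, List.map_cons, List.map_map, List.set_cons_zero]
    rw [show (fun (r : List Int) (j : Nat) => r.set (j + 1) (f (j + 1)))
          = fun r j => r.set (j + 1) (f (j + 1)) from rfl]
    rw [foldl_set_shift f (List.range l.length) (f 0) l, ih (fun j => f (j + 1))]
    rfl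

lemma inner_fold (f : Nat → Int) :
    ∀ (js : List Nat) (m : List (List Int)) (i : Nat), i < m.length →
      js.foldl (fun acc j => pvSetCellN acc i j (f j)) m
        = m.set i (js.foldl (fun r j => r.set j (f j)) (m.getD i [])) := by
  intro js
  induction js with
  | nil =>
    intro m i h
    simp only [List.foldl_nil]
    rw [List.getD_eq_getElem m [] h, List.set_getElem_self]
  | cons j js ih =>
    intro m i h
    simp only [List.foldl_cons]
    rw [show pvSetCellN m i j (f j) = m.set i ((m.getD i []).set j (f j)) from rfl]
    rw [ih _ i (by simpa using h), List.set_set]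
    congr 1
    rw [List.getD_eq_getElem _ [] (by simpa using h), List.getElem_set_self]

lemma outer_fold (N : Nat) (f : Nat → Int) :
    ∀ k, k ≤ N →
      (List.range k).foldl
        (fun m i => (List.range N).foldl (fun acc j => pvSetCellN acc i j (f j)) m)
        (List.replicate N (List.replicate N (0 : Int)))
      = List.replicate k ((List.range N).map f)
          ++ List.replicate (N - k) (List.replicate N (0 : Int)) := by
  intro k
  induction k with
  | zero => intro _; simp
  | succ k ih =>
    intro hk
    rw [List.range_succ, List.foldl_append, ih (by omega)]
    simp only [List.foldl_cons, List.foldl_nil]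
    have hlen : (List.replicate k ((List.range N).map f)
        ++ List.replicate (N - k) (List.replicate N (0 : Int))).length = N := by
      simp; omega
    rw [inner_fold f _ _ k (by rw [hlen]; omega)]
    have hrep : List.replicate (N - k) (List.replicate N (0 : Int))
        = List.replicate N (0 : Int) :: List.replicate (N - (k + 1)) (List.replicate N (0 : Int)) := by
      rw [show N - k = (N - (k + 1)) + 1 by omega, List.replicate_succ]
    have hget : (List.replicate k ((List.range N).map f)
        ++ List.replicate (N - k) (List.replicate N (0 : Int))).getD k []
        = List.replicate N (0 : Int) := by
      rw [hrep]
      rw [List.getD_eq_getElem _ []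
        (by simp only [List.length_append, List.length_replicate, List.length_cons]; omega)]
      rw [List.getElem_append_right (by simp)]
      simp
    rw [hget]
    rw [show (List.range N) = List.range (List.replicate N (0 : Int)).length by simp]
    rw [row_fold]
    simp only [List.length_replicate]
    rw [hrep, List.set_append_right _ _ (by simp), show k - (List.replicate k ((List.range N).map f)).length = 0 by simp]
    rw [List.set_cons_zero]
    simp [List.replicate_succ']

-- zip(*) of constant columns: transposing vs.map (replicate m ·) yields replicate m vs (vs ≠ [])
lemma zipStar_const_cols : ∀ (m : Nat) (vs : List Int), vs ≠ [] →
    pvZipStar (vs.map (fun v => List.replicate m v)) = List.replicate m vs := by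
  intro m
  induction m with
  | zero =>
    intro vs hvs
    rw [pvZipStar]
    have : ¬ ((vs.map (fun v => List.replicate 0 v)) ≠ [] ∧
        (vs.map (fun v => List.replicate 0 v)).all (fun c => !c.isEmpty)) := by
      intro ⟨hne, hall⟩
      cases vs with
      | nil => exact hne rfl
      | cons v vs => simp [List.all_cons] at hall
    simp only [this, dite_false]
    rfl
  | succ m ih =>
    intro vs hvs
    have hcond : (vs.map (fun v => List.replicate (m+1) v)) ≠ [] ∧
        (vs.map (fun v => List.replicate (m+1) v)).all (fun c => !c.isEmpty) := by
      constructor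
      · simpa using hvs
      · simp [List.all_map, List.all_eq_true, List.replicate_succ]
    rw [pvZipStar, dif_pos hcond, List.map_map, List.map_map]
    have h1 : vs.map ((fun c => c.headD 0) ∘ (fun v => List.replicate (m+1) v)) = vs := by
      simp [Function.comp_def, List.replicate_succ]
    have h2 : vs.map (List.tail ∘ (fun v => List.replicate (m+1) v))
        = vs.map (fun v => List.replicate m v) := by
      simp [Function.comp_def, List.replicate_succ]
    rw [h1, h2, ih vs hvs, List.replicate_succ]

lemma cols_eq (N : Nat) (f : Nat → Int) :
    (List.range N).map (fun j => List.replicate N (f j))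
      = ((List.range N).map f).map (fun v => List.replicate N v) := by
  rw [List.map_map]; rfl

-- ===== VERDICT (by name: the statement is the Claim_ definition above) =====
theorem generate_spec : Claim_equal_generate := by
  intro n _
  unfold Spec_generate generate generate_alt
  rw [PySem.List.pyRange_one]
  simp only [Int.sub_zero, zero_add, List.foldl_map, List.map_map, Function.comp_def]
  set N := n.toNat with hN
  simp only [List.map_const', List.length_range]
  have hstep : (fun (p : List (List Int) × List (List Int)) (i : Nat) =>
        List.foldl
          (fun (q : List (List Int) × List (List Int)) (j : Nat) =>
            (pvSetCell q.1 (i : Int) (j : Int) (PySem.Int.mod (j : Int) 32),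
             pvSetCell q.2 (i : Int) (j : Int) (PySem.Int.mod (j : Int) 64))) p (List.range N))
      = fun p i =>
        ((List.range N).foldl (fun acc j => pvSetCellN acc i j (PySem.Int.mod (j : Int) 32)) p.1,
         (List.range N).foldl (fun acc j => pvSetCellN acc i j (PySem.Int.mod (j : Int) 64)) p.2) := by
    funext p i
    rw [show (fun (q : List (List Int) × List (List Int)) (j : Nat) =>
          (pvSetCell q.1 (i : Int) (j : Int) (PySem.Int.mod (j : Int) 32),
           pvSetCell q.2 (i : Int) (j : Int) (PySem.Int.mod (j : Int) 64)))
        = fun q j => (pvSetCellN q.1 i j (PySem.Int.mod (j : Int) 32),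
                      pvSetCellN q.2 i j (PySem.Int.mod (j : Int) 64)) by
      funext q j; rw [pvSetCell_natCast, pvSetCell_natCast]]
    exact foldl_pair (fun acc j => pvSetCellN acc i j (PySem.Int.mod (j : Int) 32))
      (fun acc j => pvSetCellN acc i j (PySem.Int.mod (j : Int) 64)) (List.range N) p.1 p.2
  rw [hstep, foldl_pair
    (fun m i => List.foldl (fun acc j => pvSetCellN acc i j (PySem.Int.mod (j : Int) 32)) m (List.range N))
    (fun m i => List.foldl (fun acc j => pvSetCellN acc i j (PySem.Int.mod (j : Int) 64)) m (List.range N))]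
  rw [outer_fold N (fun j => PySem.Int.mod (j : Int) 32) N (le_refl N)]
  rw [outer_fold N (fun j => PySem.Int.mod (j : Int) 64) N (le_refl N)]
  simp only [Nat.sub_self, List.replicate_zero, List.append_nil]
  -- right side: pvZipStar of constant columns
  by_cases hNz : N = 0
  · simp only [hNz]; simp [pvZipStar]
  · have hr : (List.range N) ≠ [] := by simp [List.range_eq_nil, hNz]
    have hvs32 : ((List.range N).map (fun j : Nat => PySem.Int.mod (j : Int) 32)) ≠ [] := by
      simpa [List.map_eq_nil_iff] using hr
    have hvs64 : ((List.range N).map (fun j : Nat => PySem.Int.mod (j : Int) 64)) ≠ [] := by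
      simpa [List.map_eq_nil_iff] using hr
    rw [cols_eq N (fun j : Nat => PySem.Int.mod (j : Int) 32),
        cols_eq N (fun j : Nat => PySem.Int.mod (j : Int) 64),
        zipStar_const_cols N _ hvs32, zipStar_const_cols N _ hvs64]
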